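-- pv_equiv track=rewrite | github.com/TheoXiong7/SicilyChessBot | sicily.py | flip_fen
-- ===== SOURCE A (Python) =====
-- def flip_fen(fen):
--     """
--     Flip a FEN string to reverse board orientation
--
--     Args:
--         fen (str): Board position in FEN notation (piece placement only)
--
--     Returns:
--         str: Flipped FEN string
--     """
--     try:
--         ranks = fen.split('/')
--         # Reverse the order of ranks and flip each rank horizontally
--         flipped_ranks = []
--         for rank in reversed(ranks):
--             # Reverse the rank string (flip horizontally)
--             flipped_rank = rank[::-1]
--             flipped_ranks.append(flipped_rank)
--         return '/'.join(flipped_ranks)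
--     except:
--         return fen
-- ===== SOURCE B (Python) =====
-- def flip_fen(fen):
--     # Reversing rank order and each rank, joined by '/', is exactly reversing the whole string.
--     return fen[::-1]
-- ===== Notes on version B (the rewrite author's own statement) =====
-- stated objective: simpler
-- what changed: B returns fen[::-1] directly: splitting on '/', reversing the rank list and reversing each rank before rejoining is provably the same as one whole-string reversal.
import Mathlib
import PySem

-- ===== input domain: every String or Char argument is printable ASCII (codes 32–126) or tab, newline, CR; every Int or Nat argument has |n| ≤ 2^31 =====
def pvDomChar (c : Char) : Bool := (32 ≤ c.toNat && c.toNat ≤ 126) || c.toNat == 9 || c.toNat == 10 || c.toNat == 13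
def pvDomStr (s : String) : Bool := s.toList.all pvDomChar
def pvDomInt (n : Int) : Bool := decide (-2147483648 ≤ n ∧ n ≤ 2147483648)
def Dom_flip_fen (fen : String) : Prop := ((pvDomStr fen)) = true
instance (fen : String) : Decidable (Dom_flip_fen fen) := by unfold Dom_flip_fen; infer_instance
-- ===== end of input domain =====

-- B replaces A's split-on-'/', reverse-rank-order, reverse-each-rank, rejoin pipeline by a
-- single whole-string reversal fen[::-1] (the same value, proved below); objective: simpler.


-- ===== PORT A =====
-- try: split on '/', loop over reversed(ranks) appending each rank[::-1], join with '/';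
-- except: return fen (unreachable here: sep "/" is nonempty and step -1 is nonzero,
-- so both Option fallbacks below are dead, matching Python where no exception occurs).
def flip_fen (fen : String) : String :=
  match PySem.Str.split? fen "/" with
  | none => fen
  | some ranks =>
    let flipped_ranks :=
      ranks.reverse.foldl
        (fun acc rank => acc ++ [(PySem.Str.slice? rank none none (-1)).getD rank]) []
    PySem.Str.join "/" flipped_ranks

-- ===== PORT B =====
-- return fen[::-1]  (step -1 slice is always some; the fallback is dead)
def flip_fen_alt (fen : String) : String :=
  (PySem.Str.slice? fen none none (-1)).getD fen

-- ===== PRECONDITION & SPEC =====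
def Spec_flip_fen (fen : String) (out : String) : Prop := out = flip_fen_alt fen
instance (fen : String) (out : String) : Decidable (Spec_flip_fen fen out) := by unfold Spec_flip_fen; infer_instance

-- ===== CLAIM (what is proved, stated in full; the proofs are below) =====
def Claim_equal_flip_fen : Prop := ∀ (fen : String), Dom_flip_fen fen → Spec_flip_fen fen (flip_fen fen)

-- ===== LEMMAS AND PROOFS =====

-- reference single-character splitter, structurally recursive
def mySplit (x : Char) : List Char → List (List Char)
  | [] => [[]]
  | c :: rest => if x = c then [] :: mySplit x rest else (mySplit x rest).modifyHead (c :: ·)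

theorem mySplit_ne_nil (x : Char) (l : List Char) : mySplit x l ≠ [] := by
  induction l with
  | nil => simp [mySplit]
  | cons c rest ih =>
    simp only [mySplit]
    split_ifs
    · simp
    · cases hm : mySplit x rest with
      | nil => exact absurd hm ih
      | cons a b => simp [List.modifyHead]

theorem inter_nil (x : Char) : [x].intercalate ([] : List (List Char)) = [] := by
  simp [List.intercalate]

theorem inter_single (x : Char) (a : List Char) : [x].intercalate [a] = a := by
  simp [List.intercalate]

theorem inter_cc (x : Char) (a b : List Char) (t : List (List Char)) :
    [x].intercalate (a :: b :: t) = a ++ x :: [x].intercalate (b :: t) := by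
  simp [List.intercalate]

theorem go_zero (x : Char) (l cur : List Char) (acc : List (List Char)) :
    PySem.Chars.splitOn.go [x] 0 l cur acc = ((cur.reverse ++ l) :: acc).reverse := by
  rw [PySem.Chars.splitOn.go]

theorem go_succ_nil (x : Char) (fuel : Nat) (cur : List Char) (acc : List (List Char)) :
    PySem.Chars.splitOn.go [x] (fuel+1) [] cur acc = (cur.reverse :: acc).reverse := by
  rw [PySem.Chars.splitOn.go]; simp

theorem go_succ_cons (x c : Char) (fuel : Nat) (rest cur : List Char) (acc : List (List Char)) :
    PySem.Chars.splitOn.go [x] (fuel+1) (c :: rest) cur acc =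
      if x = c then PySem.Chars.splitOn.go [x] fuel rest [] (cur.reverse :: acc)
      else PySem.Chars.splitOn.go [x] fuel rest (c :: cur) acc := by
  rw [PySem.Chars.splitOn.go]
  simp [List.isPrefixOf]

theorem go_spec (x : Char) (fuel : Nat) :
    ∀ (l cur : List Char) (acc : List (List Char)), l.length ≤ fuel →
      PySem.Chars.splitOn.go [x] fuel l cur acc
        = acc.reverse ++ (mySplit x l).modifyHead (cur.reverse ++ ·) := by
  induction fuel with
  | zero =>
    intro l cur acc h
    have : l = [] := by cases l <;> simp_all
    subst this
    rw [go_zero]; simp [mySplit, List.modifyHead]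
  | succ n ih =>
    intro l cur acc h
    cases l with
    | nil => rw [go_succ_nil]; simp [mySplit, List.modifyHead]
    | cons c rest =>
      rw [go_succ_cons]
      simp only [List.length_cons] at h
      obtain ⟨a, b, hab⟩ : ∃ a b, mySplit x rest = a :: b := by
        cases hm : mySplit x rest with
        | nil => exact absurd hm (mySplit_ne_nil x rest)
        | cons a b => exact ⟨a, b, rfl⟩
      by_cases hx : x = c
      · simp only [if_pos hx]
        rw [ih rest [] (cur.reverse :: acc) (by omega)]
        simp [mySplit, if_pos hx, hab, List.modifyHead]
      · simp only [if_neg hx]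
        rw [ih rest (c :: cur) acc (by omega)]
        simp [mySplit, if_neg hx, hab, List.modifyHead]

theorem chars_splitOn_eq (x : Char) (cs : List Char) :
    PySem.Chars.splitOn cs [x] = mySplit x cs := by
  unfold PySem.Chars.splitOn
  rw [go_spec x (cs.length + 1) cs [] [] (by omega)]
  obtain ⟨a, b, hab⟩ : ∃ a b, mySplit x cs = a :: b := by
    cases hm : mySplit x cs with
    | nil => exact absurd hm (mySplit_ne_nil x cs)
    | cons a b => exact ⟨a, b, rfl⟩
  simp [hab, List.modifyHead]

theorem inter_append_singleton (x : Char) (a : List Char) :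
    ∀ (l : List (List Char)), l ≠ [] →
      List.intercalate [x] (l ++ [a]) = List.intercalate [x] l ++ x :: a := by
  intro l
  induction l with
  | nil => intro h; exact absurd rfl h
  | cons b t ih =>
    intro _
    cases t with
    | nil => simp [inter_cc, inter_single]
    | cons c u =>
      have hth := ih (by simp)
      simp only [List.cons_append] at hth ⊢
      rw [inter_cc, hth, inter_cc]
      simp

theorem inter_rev (x : Char) :
    ∀ (l : List (List Char)),
      List.intercalate [x] (l.reverse.map List.reverse) = (List.intercalate [x] l).reverse := by
  intro l
  induction l with
  | nil => simp [inter_nil]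
  | cons a t ih =>
    cases t with
    | nil => simp [inter_single]
    | cons b u =>
      have hne : ((b :: u).reverse.map List.reverse) ≠ [] := by simp
      calc List.intercalate [x] ((a :: b :: u).reverse.map List.reverse)
          = List.intercalate [x] ((b :: u).reverse.map List.reverse ++ [a.reverse]) := by simp
        _ = List.intercalate [x] ((b :: u).reverse.map List.reverse) ++ x :: a.reverse :=
            inter_append_singleton x a.reverse _ hne
        _ = (List.intercalate [x] (b :: u)).reverse ++ x :: a.reverse := by rw [ih]
        _ = (List.intercalate [x] (a :: b :: u)).reverse := by rw [inter_cc]; simp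

theorem inter_mySplit (x : Char) (cs : List Char) :
    List.intercalate [x] (mySplit x cs) = cs := by
  induction cs with
  | nil => simp [mySplit, inter_single]
  | cons c rest ih =>
    obtain ⟨a, b, hab⟩ : ∃ a b, mySplit x rest = a :: b := by
      cases hm : mySplit x rest with
      | nil => exact absurd hm (mySplit_ne_nil x rest)
      | cons a b => exact ⟨a, b, rfl⟩
    rw [hab] at ih
    by_cases hx : x = c
    · subst hx
      rw [show mySplit x (x :: rest) = [] :: a :: b by simp [mySplit, hab]]
      rw [inter_cc, ih]
      simp
    · simp only [mySplit, if_neg hx, hab, List.modifyHead]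
      cases b with
      | nil =>
        rw [inter_single]
        rw [inter_single] at ih
        simp [ih]
      | cons d u =>
        rw [inter_cc]
        rw [inter_cc] at ih
        simp [← ih]

theorem foldl_push {α β : Type} (f : α → β) :
    ∀ (l : List α) (init : List β),
      l.foldl (fun acc r => acc ++ [f r]) init = init ++ l.map f := by
  intro l
  induction l with
  | nil => simp
  | cons a t ih => intro init; simp [List.foldl_cons, ih]

-- ===== VERDICT (by name: the statement is the Claim_ definition above) =====
theorem flip_fen_spec : Claim_equal_flip_fen := by
  unfold Claim_equal_flip_fen Spec_flip_fen
  intro fen _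
  unfold flip_fen flip_fen_alt
  rw [PySem.Str.slice?_none_none_neg_one]
  simp only [Option.getD_some]
  have hsep : ("/" : String).toList = ['/'] := by decide
  rw [show PySem.Str.split? fen "/"
        = some ((PySem.Chars.splitOn fen.toList ['/']).map String.ofList) by
      simp [PySem.Str.split?, PySem.Chars.split?, hsep]]
  simp only
  rw [foldl_push]
  rw [chars_splitOn_eq]
  rw [← String.toList_inj]
  rw [PySem.Str.toList_join]
  simp only [List.nil_append, List.map_map, List.map_reverse, hsep]
  rw [show List.map (String.toList ∘ (fun rank =>
        (PySem.Str.slice? rank none none (-1)).getD rank) ∘ String.ofList)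
        (mySplit '/' fen.toList)
      = List.map List.reverse (mySplit '/' fen.toList) from
    List.map_congr_left (fun p _ => by
      simp [Function.comp, PySem.Str.slice?_none_none_neg_one])]
  show PySem.Chars.join ['/'] _ = _
  unfold PySem.Chars.join
  rw [← List.map_reverse]
  rw [inter_rev, inter_mySplit]
  simp
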